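-- pv_equiv track=rewrite | github.com/1801BM1/cpu11 | lsi/rom/tools/mca.py | get_x10
-- ===== SOURCE A (Python) =====
-- def get_x10(mset, mclr, x=10):
--     s = ''
--     for i in range(x):
--         if mset & (1 << (x - 1 - i)):
--             if mclr & (1 << (x - 1 - i)):
--                 s += '.'
--             else:
--                 s += '1'
--         elif mclr & (1 << (x - 1 - i)):
--             s += '0'
--         else:
--             s += 'x'
--     return s
-- ===== SOURCE B (Python) =====
-- def get_x10(mset, mclr, x=10):
--     # Divide-and-conquer on the width: split the field in half, render each half
--     # independently (high half via arithmetic shift, low half via mask), concatenate.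
--     if x <= 0:
--         return ''
--     if x == 1:
--         return "x01."[2 * (mset & 1) + (mclr & 1)]
--     h = x >> 1            # width of the high half
--     lo = x - h            # width of the low half
--     m = (1 << lo) - 1
--     return get_x10(mset >> lo, mclr >> lo, h) + get_x10(mset & m, mclr & m, lo)
-- ===== Notes on version B (the rewrite author's own statement) =====
-- stated objective: faster
-- what changed: B renders the field by divide-and-conquer on the width -- split in half, render the high half of the two masks via an arithmetic shift and the low half via a bit mask recursively, concatenate, with a single 4-char table lookup at width 1 -- instead of A's left-to-right loop that probes one rebuilt full-width power-of-two mask per position through a nested if/elif chain.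
import Mathlib
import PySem

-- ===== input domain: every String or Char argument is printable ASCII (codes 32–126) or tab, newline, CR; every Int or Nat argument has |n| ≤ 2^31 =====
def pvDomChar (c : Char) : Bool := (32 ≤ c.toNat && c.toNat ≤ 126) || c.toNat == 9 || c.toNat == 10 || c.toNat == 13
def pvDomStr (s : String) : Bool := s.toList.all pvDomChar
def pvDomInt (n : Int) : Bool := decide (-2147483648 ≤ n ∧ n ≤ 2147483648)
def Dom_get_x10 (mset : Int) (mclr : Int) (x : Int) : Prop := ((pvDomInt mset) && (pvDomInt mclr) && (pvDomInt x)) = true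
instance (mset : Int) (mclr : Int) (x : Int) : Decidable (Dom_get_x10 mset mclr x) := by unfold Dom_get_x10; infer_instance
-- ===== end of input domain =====

-- B renders the field by divide-and-conquer on the width: split it in half, render the high half
-- (arithmetic shift) and the low half (mask) recursively and concatenate — a recursive decomposition
-- instead of A's single left-to-right loop probing one power-of-two mask per position.


-- ===== PORT A =====
-- '1 << (x - 1 - i)' : for i in range(x) the shift amount x-1-i is always ≥ 0, so '.toNat' is exact here.
def get_x10 (mset : Int) (mclr : Int) (x : Int) : String :=
  (PySem.List.pyRange 0 x 1).foldl (fun s i =>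
    if PySem.Int.band mset ((1 : Int) <<< (x - 1 - i).toNat ) ≠ 0 then
      if PySem.Int.band mclr ((1 : Int) <<< (x - 1 - i).toNat) ≠ 0 then s ++ "." else s ++ "1"
    else if PySem.Int.band mclr ((1 : Int) <<< (x - 1 - i).toNat) ≠ 0 then s ++ "0"
    else s ++ "x") ""

-- ===== PORT B =====
-- Source B's recursion, on the list-of-chars side (String.ofList at the end).
-- 'x >> 1' is Lean's 'x >>> 1'; the shift amounts 'lo' are ≥ 1 in the recursive branch, so '.toNat' is
-- exact; the '"x01."[idx]' index is always 0..3, so the '.getD' default is unreachable.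
def pvBChars (mset : Int) (mclr : Int) (x : Int) : List Char :=
  if x ≤ 0 then []
  else if x = 1 then
    [(PySem.Chars.pyGet? "x01.".toList (2 * PySem.Int.band mset 1 + PySem.Int.band mclr 1)).getD 'x']
  else
    let h := x >>> (1 : Nat)
    let lo := x - h
    let m := ((1 : Int) <<< lo.toNat) - 1
    pvBChars (mset >>> lo.toNat) (mclr >>> lo.toNat) h ++
      pvBChars (PySem.Int.band mset m) (PySem.Int.band mclr m) lo
termination_by x.toNat
decreasing_by
  all_goals simp only [Int.shiftRight_eq_div_pow] at *; omega

def get_x10_alt (mset : Int) (mclr : Int) (x : Int) : String :=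
  String.ofList (pvBChars mset mclr x)

-- ===== PRECONDITION & SPEC =====
def Spec_get_x10 (mset : Int) (mclr : Int) (x : Int) (out : String) : Prop := out = get_x10_alt mset mclr x
instance (mset : Int) (mclr : Int) (x : Int) (out : String) : Decidable (Spec_get_x10 mset mclr x out) := by unfold Spec_get_x10; infer_instance

-- ===== CLAIM (what is proved, stated in full; the proofs are below) =====
def Claim_equal_get_x10 : Prop := ∀ (mset : Int) (mclr : Int) (x : Int), Dom_get_x10 mset mclr x → Spec_get_x10 mset mclr x (get_x10 mset mclr x)

-- ===== LEMMAS AND PROOFS =====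

-- the character both programs emit for bit position j
def pvCh (m c : Int) (j : Nat) : Char :=
  if m.testBit j then (if c.testBit j then '.' else '1')
  else (if c.testBit j then '0' else 'x')

-- the common normal form: chars for bits n-1 … 0
def pvChs (m c : Int) (n : Nat) : List Char :=
  (List.range n).map (fun k => pvCh m c (n - 1 - k))

theorem pv_band_pow (m : Int) (j : Nat) :
    (PySem.Int.band m ((1 : Int) <<< j) ≠ 0) ↔ m.testBit j = true := by
  have hpow : (1 : Int) <<< j = ((2 ^ j : Nat) : Int) := by
    show Int.shiftLeft 1 j = _
    simp [Int.shiftLeft, Nat.shiftLeft_eq]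
  rw [hpow]
  cases m with
  | ofNat n =>
      rw [show ((Int.ofNat n) : Int) = ((n : Nat) : Int) from rfl]
      rw [PySem.Int.band_natCast]
      simp [Int.testBit, Nat.and_two_pow]
  | negSucc n =>
      have h1 : ¬ (0 : Int) ≤ Int.negSucc n := by omega
      have h2 : (0 : Int) ≤ ((2 ^ j : Nat) : Int) := by positivity
      rw [PySem.Int.band]
      simp only [h1, h2, if_true, if_false]
      have h3 : (-(Int.negSucc n) - 1).toNat = n := by omega
      have h4 : (((2 ^ j : Nat) : Int)).toNat = 2 ^ j := Int.toNat_natCast _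
      rw [h3, h4, Nat.two_pow_and]
      simp [Int.testBit]
      cases hb : n.testBit j <;> simp

theorem pvA_char (m c x : Int) :
    (fun (s : String) (i : Int) =>
      if PySem.Int.band m ((1 : Int) <<< (x - 1 - i).toNat) ≠ 0 then
        if PySem.Int.band c ((1 : Int) <<< (x - 1 - i).toNat) ≠ 0 then s ++ "." else s ++ "1"
      else if PySem.Int.band c ((1 : Int) <<< (x - 1 - i).toNat) ≠ 0 then s ++ "0"
      else s ++ "x")
    = (fun (s : String) (i : Int) => s ++ String.ofList [pvCh m c (x - 1 - i).toNat]) := by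
  funext s i
  simp only [pv_band_pow, pvCh]
  split_ifs <;> rfl

theorem pv_foldl_str (f : Int → Char) (l : List Int) (s : String) :
    l.foldl (fun s i => s ++ String.ofList [f i]) s = String.ofList (s.toList ++ l.map f) := by
  induction l generalizing s with
  | nil => simp
  | cons a t ih => simp [List.foldl, ih]

-- A computes the normal form
theorem pvA_eq (m c x : Int) : get_x10 m c x = String.ofList (pvChs m c x.toNat) := by
  unfold get_x10
  rw [pvA_char, pv_foldl_str, PySem.List.pyRange_one]
  simp only [String.toList_empty, List.nil_append, List.map_map]
  unfold pvChs
  congr 1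
  rw [Int.sub_zero]
  apply List.map_congr_left
  intro k hk
  rw [List.mem_range] at hk
  simp only [Function.comp_apply]
  congr 1
  omega

theorem pv_band_one (m : Int) :
    PySem.Int.band m 1 = (if m.testBit 0 then (1 : Int) else 0) := by
  cases m with
  | ofNat n =>
      rw [show ((Int.ofNat n) : Int) = ((n : Nat) : Int) from rfl,
          show (1 : Int) = ((1 : Nat) : Int) from rfl, PySem.Int.band_natCast]
      have : n &&& 1 = n % 2 := Nat.and_one_is_mod n
      rw [this]
      rw [show ((n : Nat) : Int).testBit 0 = n.testBit 0 from Int.testBit.eq_1 0 n,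
          Nat.testBit_zero]
      rcases Nat.mod_two_eq_zero_or_one n with h | h <;> simp [h]
  | negSucc n =>
      have h1 : ¬ (0 : Int) ≤ Int.negSucc n := by omega
      rw [PySem.Int.band]
      simp only [h1, if_false, show (0:Int) ≤ 1 by omega, if_true]
      have h3 : (-(Int.negSucc n) - 1).toNat = n := by omega
      rw [h3]
      have : (1 : Int).toNat &&& n = n % 2 := by
        rw [Nat.and_comm]; exact Nat.and_one_is_mod n
      rw [this]
      rw [Int.testBit.eq_2, Nat.testBit_zero]
      rcases Nat.mod_two_eq_zero_or_one n with h | h <;> simp [h]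

theorem pv_testBit_shiftRight (m : Int) (d j : Nat) :
    (m >>> d).testBit j = m.testBit (d + j) := by
  cases m with
  | ofNat n =>
      have h : (Int.ofNat n) >>> d = ((n >>> d : Nat) : Int) := rfl
      rw [h]
      show (n >>> d).testBit j = n.testBit (d + j)
      exact Nat.testBit_shiftRight n
  | negSucc n =>
      have h : (Int.negSucc n) >>> d = Int.negSucc (n >>> d) := rfl
      rw [h, Int.testBit.eq_2, Int.testBit.eq_2, Nat.testBit_shiftRight]

theorem pv_testBit_band_mask (m : Int) (d j : Nat) (hj : j < d) :
    (PySem.Int.band m (((1 : Int) <<< d) - 1)).testBit j = m.testBit j := by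
  have hpow : (1 : Int) <<< d = ((2 ^ d : Nat) : Int) := by
    show Int.shiftLeft 1 d = _
    simp [Int.shiftLeft, Nat.shiftLeft_eq]
  have hmask : ((1 : Int) <<< d) - 1 = ((2 ^ d - 1 : Nat) : Int) := by
    rw [hpow]
    have : 1 ≤ 2 ^ d := Nat.one_le_two_pow
    push_cast [this]
    ring
  rw [hmask]
  cases m with
  | ofNat n =>
      rw [show ((Int.ofNat n) : Int) = ((n : Nat) : Int) from rfl, PySem.Int.band_natCast]
      rw [Nat.and_two_pow_sub_one_eq_mod]
      show (n % 2 ^ d).testBit j = n.testBit j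
      rw [Nat.testBit_mod_two_pow]
      simp [hj]
  | negSucc n =>
      have h1 : ¬ (0 : Int) ≤ Int.negSucc n := by omega
      have h2 : (0 : Int) ≤ ((2 ^ d - 1 : Nat) : Int) := by positivity
      rw [PySem.Int.band]
      simp only [h1, h2, if_true, if_false]
      have h3 : (-(Int.negSucc n) - 1).toNat = n := by omega
      have h4 : (((2 ^ d - 1 : Nat) : Int)).toNat = 2 ^ d - 1 := Int.toNat_natCast _
      rw [h3, h4, Nat.and_comm, Nat.and_two_pow_sub_one_eq_mod]
      have hr : n % 2 ^ d < 2 ^ d := Nat.mod_lt _ (Nat.two_pow_pos d)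
      have h5 : 2 ^ d - 1 - n % 2 ^ d = 2 ^ d - (n % 2 ^ d + 1) := by omega
      have h6 : ((2 ^ d - 1 - n % 2 ^ d : Nat) : Int) = Int.ofNat (2 ^ d - 1 - n % 2 ^ d) := rfl
      rw [h6, Int.testBit.eq_1, Int.testBit.eq_2, h5, Nat.testBit_two_pow_sub_succ hr,
          Nat.testBit_mod_two_pow]
      simp [hj]

-- shifting both masks shifts the bit index of the emitted character
theorem pvCh_shift (m c : Int) (d j : Nat) :
    pvCh (m >>> d) (c >>> d) j = pvCh m c (d + j) := by
  unfold pvCh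
  rw [pv_testBit_shiftRight, pv_testBit_shiftRight]

theorem pvCh_mask (m c : Int) (d j : Nat) (hj : j < d) :
    pvCh (PySem.Int.band m (((1 : Int) <<< d) - 1)) (PySem.Int.band c (((1 : Int) <<< d) - 1)) j
      = pvCh m c j := by
  unfold pvCh
  rw [pv_testBit_band_mask m d j hj, pv_testBit_band_mask c d j hj]

-- the normal form splits at any cut h + l of the width
theorem pvChs_split (m c : Int) (h l : Nat) :
    pvChs m c (h + l)
      = pvChs (m >>> l) (c >>> l) h ++
        pvChs (PySem.Int.band m (((1 : Int) <<< l) - 1)) (PySem.Int.band c (((1 : Int) <<< l) - 1)) l := by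
  unfold pvChs
  rw [List.range_add, List.map_append, List.map_map]
  congr 1
  · apply List.map_congr_left
    intro k hk
    rw [List.mem_range] at hk
    rw [pvCh_shift]
    congr 1
    omega
  · apply List.map_congr_left
    intro k hk
    rw [List.mem_range] at hk
    simp only [Function.comp_apply]
    rw [pvCh_mask m c l _ (by omega)]
    congr 1
    omega

-- B computes the normal form
theorem pvB_eq (m c x : Int) : pvBChars m c x = pvChs m c x.toNat := by
  have H : ∀ n : Nat, ∀ m c x : Int, x.toNat = n → pvBChars m c x = pvChs m c x.toNat := by
    intro n
    induction n using Nat.strong_induction_on with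
    | _ n ih =>
      intro m c x hn
      rw [pvBChars]
      by_cases h0 : x ≤ 0
      · rw [if_pos h0]
        have : x.toNat = 0 := by omega
        rw [this]
        rfl
      · by_cases h1 : x = 1
        · subst h1
          rw [if_neg (by omega : ¬ (1 : Int) ≤ 0), if_pos rfl]
          have ht1 : (1 : Int).toNat = 1 := rfl
          rw [ht1]
          unfold pvChs
          simp only [List.range_one, List.map]
          rw [pv_band_one m, pv_band_one c]
          cases hm : m.testBit 0 <;> cases hc : c.testBit 0 <;>
            simp [pvCh, hm, hc]
        · rw [if_neg h0, if_neg h1]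
          show pvBChars (m >>> (x - x >>> (1 : Nat)).toNat) (c >>> (x - x >>> (1 : Nat)).toNat)
                (x >>> (1 : Nat)) ++
              pvBChars (PySem.Int.band m (((1 : Int) <<< (x - x >>> (1 : Nat)).toNat) - 1))
                (PySem.Int.band c (((1 : Int) <<< (x - x >>> (1 : Nat)).toNat) - 1))
                (x - x >>> (1 : Nat))
              = pvChs m c x.toNat
          have hdiv : x >>> (1 : Nat) = x / 2 := by
            rw [Int.shiftRight_eq_div_pow]; norm_num
          have hx2 : 2 ≤ x := by omega
          have hh1 : 1 ≤ x >>> (1 : Nat) := by rw [hdiv]; omega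
          have hhx : x >>> (1 : Nat) < x := by rw [hdiv]; omega
          rw [ih (x >>> (1 : Nat)).toNat (by omega) _ _ _ rfl,
              ih (x - x >>> (1 : Nat)).toNat (by omega) _ _ _ rfl]
          have hsplit : x.toNat = (x >>> (1 : Nat)).toNat + (x - x >>> (1 : Nat)).toNat := by
            omega
          rw [hsplit, pvChs_split m c ((x >>> (1 : Nat)).toNat) ((x - x >>> (1 : Nat)).toNat)]
  exact H x.toNat m c x rfl

-- ===== VERDICT (by name: the statement is the Claim_ definition above) =====
theorem get_x10_spec : Claim_equal_get_x10 := by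
  intro m c x _
  unfold Spec_get_x10 get_x10_alt
  rw [pvA_eq, pvB_eq]
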